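-- pv_equiv track=rewrite | github.com/banusphil-dotcom/BanusNVR-Stack | apps/backend/services/notification_engine.py | _is_muted
-- ===== SOURCE A (Python) =====
-- _OBJECT_TYPE_GROUPS: dict[str, tuple[str, ...]] = {
--     "person": ("person",),
--     "cat": ("pet",),
--     "dog": ("pet",),
--     "bird": ("pet",),
--     "car": ("vehicle",),
--     "truck": ("vehicle",),
--     "bus": ("vehicle",),
--     "motorcycle": ("vehicle",),
--     "bicycle": ("vehicle",),
--     "motion": ("motion",),
-- }
--
-- def _is_muted(object_type: str, muted: list[str]) -> bool:
--     if not muted or not object_type: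
--         return False
--     muted_set = {m.lower() for m in muted}
--     ot = object_type.lower()
--     if ot in muted_set:
--         return True
--     for grp in _OBJECT_TYPE_GROUPS.get(ot, ()):
--         if grp in muted_set:
--             return True
--     return False
-- ===== SOURCE B (Python) =====
-- # Reverse index: group name -> the object types it covers.
-- _GROUP_MEMBERS: dict[str, tuple[str, ...]] = {
--     "person": ("person",),
--     "pet": ("cat", "dog", "bird"),
--     "vehicle": ("car", "truck", "bus", "motorcycle", "bicycle"),
--     "motion": ("motion",),
-- }
--
-- def _is_muted(object_type: str, muted: list[str]) -> bool:
--     if not object_type: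
--         return False
--     ot = object_type.lower()
--     for m in muted:
--         ml = m.lower()
--         if ml == ot or ot in _GROUP_MEMBERS.get(ml, ()):
--             return True
--     return False
-- ===== Notes on version B (the rewrite author's own statement) =====
-- stated objective: alternative
-- what changed: B builds no set at all: it uses an inverted table (group -> member types) and a single early-exit loop over muted, asking of each muted entry directly 'does this name or group cover the object type?', instead of A's forward table plus a set of lowered muted entries probed by the type and each of its groups.
import Mathlib
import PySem

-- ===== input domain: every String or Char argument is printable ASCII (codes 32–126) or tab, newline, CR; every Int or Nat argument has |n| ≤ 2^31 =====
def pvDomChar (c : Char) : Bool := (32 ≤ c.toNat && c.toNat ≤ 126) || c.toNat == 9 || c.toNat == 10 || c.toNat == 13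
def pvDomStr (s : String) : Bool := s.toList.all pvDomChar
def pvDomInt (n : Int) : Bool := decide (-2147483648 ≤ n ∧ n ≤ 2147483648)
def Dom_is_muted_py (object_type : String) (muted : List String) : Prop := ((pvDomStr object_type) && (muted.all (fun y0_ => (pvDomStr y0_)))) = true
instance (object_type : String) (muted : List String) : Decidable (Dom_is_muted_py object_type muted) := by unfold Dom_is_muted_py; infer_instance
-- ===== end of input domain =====

-- B drops both sets and A's forward table: it uses an inverted table (group -> member
-- types) and one early-exit loop over muted, testing each entry directly (objective: alternative).

-- ===== PORT A =====
-- the module constant _OBJECT_TYPE_GROUPS (tuples become lists)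
def pvGroups : PySem.Dict String (List String) :=
  PySem.Dict.ofList [("person", ["person"]), ("cat", ["pet"]), ("dog", ["pet"]), ("bird", ["pet"]),
   ("car", ["vehicle"]), ("truck", ["vehicle"]), ("bus", ["vehicle"]),
   ("motorcycle", ["vehicle"]), ("bicycle", ["vehicle"]), ("motion", ["motion"])]

def is_muted_py (object_type : String) (muted : List String) : Bool :=
  if muted.isEmpty || object_type.isEmpty then false
  else
    let muted_set : PySem.Set String := PySem.Set.ofList (muted.map PySem.Str.lower)
    let ot := PySem.Str.lower object_type
    if PySem.Set.contains muted_set ot then true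
    else (PySem.Dict.getD pvGroups ot []).any (fun grp => PySem.Set.contains muted_set grp)

-- ===== PORT B =====
-- B's reverse index _GROUP_MEMBERS (group -> member object types)
def pvMembers : PySem.Dict String (List String) :=
  PySem.Dict.ofList [("person", ["person"]), ("pet", ["cat", "dog", "bird"]),
   ("vehicle", ["car", "truck", "bus", "motorcycle", "bicycle"]), ("motion", ["motion"])]

-- the for-loop with early return, as structural recursion over muted
def pvMutedLoop (ot : String) : List String → Bool
  | [] => false
  | m :: rest =>
    let ml := PySem.Str.lower m
    if ml == ot || (PySem.Dict.getD pvMembers ml []).contains ot then true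
    else pvMutedLoop ot rest

def is_muted_py_alt (object_type : String) (muted : List String) : Bool :=
  if object_type.isEmpty then false
  else pvMutedLoop (PySem.Str.lower object_type) muted

-- ===== PRECONDITION & SPEC =====
def Spec_is_muted_py (object_type : String) (muted : List String) (out : Bool) : Prop := out = is_muted_py_alt object_type muted
instance (object_type : String) (muted : List String) (out : Bool) : Decidable (Spec_is_muted_py object_type muted out) := by unfold Spec_is_muted_py; infer_instance

-- ===== CLAIM =====
def Claim_equal_is_muted_py : Prop := ∀ (object_type : String) (muted : List String), Dom_is_muted_py object_type muted → Spec_is_muted_py object_type muted (is_muted_py object_type muted)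

-- ===== LEMMAS AND PROOFS =====
-- the two tables are inverses of each other, for arbitrary strings
theorem mem_groups_iff_mem_members (ot ml : String) :
    ml ∈ PySem.Dict.getD pvGroups ot [] ↔ ot ∈ PySem.Dict.getD pvMembers ml [] := by
  have hG : pvGroups = PySem.Dict.mk [("person", ["person"]), ("cat", ["pet"]), ("dog", ["pet"]),
      ("bird", ["pet"]), ("car", ["vehicle"]), ("truck", ["vehicle"]), ("bus", ["vehicle"]),
      ("motorcycle", ["vehicle"]), ("bicycle", ["vehicle"]), ("motion", ["motion"])] := by decide
  have hM : pvMembers = PySem.Dict.mk [("person", ["person"]), ("pet", ["cat", "dog", "bird"]),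
      ("vehicle", ["car", "truck", "bus", "motorcycle", "bicycle"]), ("motion", ["motion"])] := by decide
  rw [hG, hM]; clear hG hM
  simp only [PySem.Dict.getD_eq_get?_getD, PySem.Dict.get?_mk_cons]
  split_ifs <;> simp_all <;> subst_vars <;> simp_all [PySem.Dict.get?, eq_comm]

-- the loop returns true iff some muted entry (lowered) names ot or a group covering ot
theorem pvMutedLoop_eq_any (ot : String) (muted : List String) :
    pvMutedLoop ot muted
      = muted.any (fun m => PySem.Str.lower m == ot
          || (PySem.Dict.getD pvMembers (PySem.Str.lower m) []).contains ot) := by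
  induction muted with
  | nil => rfl
  | cons m rest ih =>
    simp only [pvMutedLoop, List.any_cons, ← ih]
    split <;> simp_all

theorem is_muted_eq (object_type : String) (muted : List String) :
    is_muted_py object_type muted = is_muted_py_alt object_type muted := by
  unfold is_muted_py is_muted_py_alt
  by_cases h : object_type.isEmpty
  · simp [h, Bool.or_true]
  · by_cases hm : muted.isEmpty
    · simp [h, List.isEmpty_iff.mp hm, pvMutedLoop]
    · simp only [h, hm, Bool.or_false, if_neg, Bool.false_eq_true,
        not_false_eq_true]
      rw [pvMutedLoop_eq_any, Bool.eq_iff_iff]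
      simp only [Bool.if_true_left, Bool.or_eq_true, PySem.Set.contains, List.contains_eq_mem,
        List.any_eq_true, PySem.Set.mem_ofList, List.mem_map, decide_eq_true_eq, beq_iff_eq]
      constructor
      · rintro (⟨m, hm', hml⟩ | ⟨g, hg, m, hm', hml⟩)
        · exact ⟨m, hm', Or.inl hml⟩
        · exact ⟨m, hm', Or.inr ((mem_groups_iff_mem_members _ _).mp (hml ▸ hg))⟩
      · rintro ⟨m, hm', hml | hml⟩
        · exact Or.inl ⟨m, hm', hml⟩
        · exact Or.inr ⟨_, (mem_groups_iff_mem_members _ _).mpr hml, m, hm', rfl⟩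

-- ===== VERDICT =====
theorem is_muted_py_spec : Claim_equal_is_muted_py := by
  intro ot muted _
  unfold Spec_is_muted_py
  exact is_muted_eq ot muted
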